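-- pv_equiv track=rewrite | github.com/sanandans/puzzles | 248ibmponder_Oct2024/pondthisoct24_sol.py | process_digits
-- ===== SOURCE A (Python) =====
-- def process_digits(num, pf_dict, dig_dict):
--     while num > 0:
--         dig = num%10
--         if dig == 0 or dig == 5:
--             return False
--         dig_dict[dig] = True
--         if dig == 2 or dig == 3 or dig == 7:
--             if pf_dict[dig] > 0:
--                 pf_dict[dig] -= 1
--             else:
--                 return False
--         elif dig == 4:
--             if pf_dict[2] > 1:
--                 pf_dict[2] -= 2
--             else:
--                 return False
--         elif dig == 8:
--             if pf_dict[2] > 2: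
--                 pf_dict[2] -= 3
--             else:
--                 return False
--         elif dig == 9:
--             if pf_dict[3] > 1:
--                 pf_dict[3] -= 2
--             else:
--                 return False
--         elif dig == 6:
--             if pf_dict[2] > 0 and pf_dict[3] > 0:
--                 pf_dict[2] -= 1
--                 pf_dict[3] -= 1
--             else:
--                 return False
--         num //= 10
--     return True
-- ===== SOURCE B (Python) =====
-- # Return-value re-implementation: one pass totals the prime budget (2,3,7) the digits
-- # need, then a single final comparison against pf_dict; equivalence is about the RETURN
-- # value only -- A mutates pf_dict/dig_dict in place, B leaves both arguments untouched.
-- _NEED = {1: (0, 0, 0), 2: (1, 0, 0), 3: (0, 1, 0), 4: (2, 0, 0),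
--          6: (1, 1, 0), 7: (0, 0, 1), 8: (3, 0, 0), 9: (0, 2, 0)}
--
-- def process_digits(num, pf_dict, dig_dict):
--     need2 = need3 = need7 = 0
--     n = num
--     while n > 0:
--         n, d = divmod(n, 10)
--         if d == 0 or d == 5:
--             return False
--         a2, a3, a7 = _NEED[d]
--         need2 += a2
--         need3 += a3
--         need7 += a7
--     for p, c in ((2, need2), (3, need3), (7, need7)):
--         if c and pf_dict.get(p, 0) < c:
--             return False
--     return True
-- ===== Notes on version B (the rewrite author's own statement) =====
-- stated objective: alternative
-- what changed: A threads a mutable prime budget through an if/elif chain, checking and decrementing pf_dict at every digit with early exit; B makes one table-driven pass that only totals the prime (2,3,7) requirements of the digits and then does a single final comparison against pf_dict, mutating nothing (return-value equivalence; A mutates pf_dict/dig_dict in place, B does not).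
import Mathlib
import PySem

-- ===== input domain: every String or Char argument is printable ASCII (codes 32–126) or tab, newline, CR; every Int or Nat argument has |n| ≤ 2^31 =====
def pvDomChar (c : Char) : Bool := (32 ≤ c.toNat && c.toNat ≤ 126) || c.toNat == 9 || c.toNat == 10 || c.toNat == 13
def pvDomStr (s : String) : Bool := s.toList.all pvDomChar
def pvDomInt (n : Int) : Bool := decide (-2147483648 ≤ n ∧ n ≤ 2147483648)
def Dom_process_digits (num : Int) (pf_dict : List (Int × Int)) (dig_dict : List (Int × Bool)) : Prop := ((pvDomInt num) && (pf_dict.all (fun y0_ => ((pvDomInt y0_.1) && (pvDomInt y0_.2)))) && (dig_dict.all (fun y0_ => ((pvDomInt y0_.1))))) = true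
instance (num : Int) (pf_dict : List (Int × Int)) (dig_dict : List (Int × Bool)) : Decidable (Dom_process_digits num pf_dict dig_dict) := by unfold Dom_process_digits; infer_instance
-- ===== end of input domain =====

-- B replaces A's per-digit check-and-decrement of the prime budget by one table-driven
-- pass totalling the (2,3,7) requirements plus a single final comparison; equivalence is
-- about the RETURN value only (Python A mutates pf_dict/dig_dict in place, B mutates nothing).


-- termination measure for the digit loops (num //= 10), cited by the ports' decreasing_by
theorem pd_fdiv10_lt (num : Int) (h : 0 < num) :
    (PySem.Int.floordiv num 10).toNat < num.toNat := by
  rw [PySem.Int.floordiv_eq_ediv_of_pos (by norm_num : (0:Int) < 10)]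
  omega

-- ===== PORT A =====
-- A's while loop as a recursion threading the two mutated dicts; Python's `pf_dict[dig]`
-- raises KeyError on a missing key (excluded by Pre_); the port reads `getD _ 0` there,
-- which sends the guard into the `else: return False` branch.
def pdLoopA (num : Int) (pf : PySem.Dict Int Int) (dd : PySem.Dict Int Bool) : Bool :=
  if h : 0 < num then
    let dig := PySem.Int.mod num 10
    if dig = 0 ∨ dig = 5 then false
    else
      let dd' := dd.insert dig true
      if dig = 2 ∨ dig = 3 ∨ dig = 7 then
        if 0 < pf.getD dig 0 then
          pdLoopA (PySem.Int.floordiv num 10) (pf.insert dig (pf.getD dig 0 - 1)) dd'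
        else false
      else if dig = 4 then
        if 1 < pf.getD 2 0 then
          pdLoopA (PySem.Int.floordiv num 10) (pf.insert 2 (pf.getD 2 0 - 2)) dd'
        else false
      else if dig = 8 then
        if 2 < pf.getD 2 0 then
          pdLoopA (PySem.Int.floordiv num 10) (pf.insert 2 (pf.getD 2 0 - 3)) dd'
        else false
      else if dig = 9 then
        if 1 < pf.getD 3 0 then
          pdLoopA (PySem.Int.floordiv num 10) (pf.insert 3 (pf.getD 3 0 - 2)) dd'
        else false
      else if dig = 6 then
        if 0 < pf.getD 2 0 ∧ 0 < pf.getD 3 0 then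
          pdLoopA (PySem.Int.floordiv num 10) ((pf.insert 2 (pf.getD 2 0 - 1)).insert 3 (pf.getD 3 0 - 1)) dd'
        else false
      else  -- dig = 1: no elif fires, fall through to num //= 10
        pdLoopA (PySem.Int.floordiv num 10) pf dd'
  else true
termination_by num.toNat
decreasing_by all_goals exact pd_fdiv10_lt num h

def process_digits (num : Int) (pf_dict : List (Int × Int)) (dig_dict : List (Int × Bool)) : Bool :=
  pdLoopA num (PySem.Dict.mk pf_dict) (PySem.Dict.mk dig_dict)

-- ===== PORT B =====
-- the _NEED table of Source B: digit ↦ (need of prime 2, need of prime 3, need of prime 7)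
def pdNEED : List (Int × (Int × Int × Int)) :=
  [(1,(0,0,0)), (2,(1,0,0)), (3,(0,1,0)), (4,(2,0,0)),
   (6,(1,1,0)), (7,(0,0,1)), (8,(3,0,0)), (9,(0,2,0))]

-- Source B's `_NEED[d]` (d is always a key of the table when this is reached)
def pdAdd (d : Int) : Int × Int × Int := (PySem.Dict.mk pdNEED).getD d (0,0,0)

-- Source B's while loop: accumulate the three need counters; none = early `return False` on 0/5
def pdScanB (n need2 need3 need7 : Int) : Option (Int × Int × Int) :=
  if h : 0 < n then
    let d := PySem.Int.mod n 10
    if d = 0 ∨ d = 5 then none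
    else
      let a := pdAdd d
      pdScanB (PySem.Int.floordiv n 10) (need2 + a.1) (need3 + a.2.1) (need7 + a.2.2)
  else some (need2, need3, need7)
termination_by n.toNat
decreasing_by exact pd_fdiv10_lt n h

def process_digits_alt (num : Int) (pf_dict : List (Int × Int)) (dig_dict : List (Int × Bool)) : Bool :=
  match pdScanB num 0 0 0 with
  | none => false
  | some (n2, n3, n7) =>
      -- Source B's final loop over ((2,need2),(3,need3),(7,need7)): `if c and pf_dict.get(p,0) < c: return False`
      (n2 == 0 || decide (n2 ≤ (PySem.Dict.mk pf_dict).getD 2 0)) &&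
      (n3 == 0 || decide (n3 ≤ (PySem.Dict.mk pf_dict).getD 3 0)) &&
      (n7 == 0 || decide (n7 ≤ (PySem.Dict.mk pf_dict).getD 7 0))

-- ===== PRECONDITION & SPEC =====
-- helpers for Pre_/Raises_ only (independent of both ports): the LSB-first digit list of
-- num, the per-digit prime requirement, and prefix-need totals
def pdDigits (n : Int) : List Int := (Nat.digits 10 n.toNat).map (fun d => (d : Int))

def pdReq (d : Int) : Int × Int × Int :=
  if d = 2 then (1,0,0) else if d = 3 then (0,1,0) else if d = 4 then (2,0,0)
  else if d = 6 then (1,1,0) else if d = 7 then (0,0,1) else if d = 8 then (3,0,0)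
  else if d = 9 then (0,2,0) else (0,0,0)

def pdNeeds (ds : List Int) : Int × Int × Int :=
  ds.foldl (fun acc d => let r := pdReq d; (acc.1 + r.1, acc.2.1 + r.2.1, acc.2.2 + r.2.2)) (0,0,0)

-- "A's loop reaches digit position i and raises KeyError there": the prefix has no 0/5
-- digit, the prefix's total need of each prime fits the budget (so no earlier early
-- return), and the digit at i indexes a prime key missing from pf_dict (with digit 6's
-- short-circuit: key 3 is only touched when the remaining budget of 2 is positive)
def pdRaiseAt (num : Int) (pf_dict : List (Int × Int)) (i : Nat) : Bool :=
  let ds := pdDigits num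
  let pre := ds.take i
  let d := ds.getD i 0
  let n := pdNeeds pre
  let D := PySem.Dict.mk pf_dict
  pre.all (fun e => !(e == 0) && !(e == 5)) &&
  (n.1 == 0 || (D.contains 2 && decide (n.1 ≤ D.getD 2 0))) &&
  (n.2.1 == 0 || (D.contains 3 && decide (n.2.1 ≤ D.getD 3 0))) &&
  (n.2.2 == 0 || (D.contains 7 && decide (n.2.2 ≤ D.getD 7 0))) &&
  (((d == 2 || d == 4 || d == 8) && !D.contains 2) ||
   ((d == 3 || d == 9) && !D.contains 3) ||
   (d == 7 && !D.contains 7) ||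
   (d == 6 && (!D.contains 2 || (decide (n.1 < D.getD 2 0) && !D.contains 3))))

-- Pre_ excludes exactly the inputs on which Python A raises KeyError: those where some
-- digit needing a prime key absent from pf_dict is reached before any 0/5 digit and
-- before any present prime's budget runs out; on every input where A returns, Pre_ holds.
-- (positions are capped at 11: |num| ≤ 2^31 < 10^11 in the stated domain has at most 10 digits,
-- so the cap changes nothing on any input the claim covers)
def Pre_process_digits (num : Int) (pf_dict : List (Int × Int)) (dig_dict : List (Int × Bool)) : Prop :=
  ∀ i ∈ List.range (min (pdDigits num).length 11), pdRaiseAt num pf_dict i = false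
instance (num : Int) (pf_dict : List (Int × Int)) (dig_dict : List (Int × Bool)) : Decidable (Pre_process_digits num pf_dict dig_dict) := by unfold Pre_process_digits; infer_instance

def pvWitness_process_digits : Int × (List (Int × Int)) × (List (Int × Bool)) :=
  (432, [(2, 5), (3, 5), (7, 5)], [(4, true)])

def Spec_process_digits (num : Int) (pf_dict : List (Int × Int)) (dig_dict : List (Int × Bool)) (out : Bool) : Prop := out = process_digits_alt num pf_dict dig_dict
instance (num : Int) (pf_dict : List (Int × Int)) (dig_dict : List (Int × Bool)) (out : Bool) : Decidable (Spec_process_digits num pf_dict dig_dict out) := by unfold Spec_process_digits; infer_instance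

-- ===== CLAIM (what is proved, stated in full; the proofs are below) =====
def Claim_equal_process_digits : Prop := ∀ (num : Int) (pf_dict : List (Int × Int)) (dig_dict : List (Int × Bool)), Dom_process_digits num pf_dict dig_dict → Pre_process_digits num pf_dict dig_dict → Spec_process_digits num pf_dict dig_dict (process_digits num pf_dict dig_dict)

-- ===== LEMMAS AND PROOFS =====
-- spec-side digit functions: "no digit is 0 or 5" and the total need of each prime
def pdOk (n : Int) : Bool :=
  if h : 0 < n then
    (if PySem.Int.mod n 10 = 0 ∨ PySem.Int.mod n 10 = 5 then false
     else pdOk (PySem.Int.floordiv n 10))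
  else true
termination_by n.toNat
decreasing_by exact pd_fdiv10_lt n h

def pdNeed (n : Int) : Int × Int × Int :=
  if h : 0 < n then
    let a := pdAdd (PySem.Int.mod n 10)
    let r := pdNeed (PySem.Int.floordiv n 10)
    (a.1 + r.1, a.2.1 + r.2.1, a.2.2 + r.2.2)
  else (0, 0, 0)
termination_by n.toNat
decreasing_by exact pd_fdiv10_lt n h

theorem pdAdd_nonneg (d : Int) (h0 : 0 ≤ d) (h9 : d < 10) :
    0 ≤ (pdAdd d).1 ∧ 0 ≤ (pdAdd d).2.1 ∧ 0 ≤ (pdAdd d).2.2 := by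
  have hd : d = 0 ∨ d = 1 ∨ d = 2 ∨ d = 3 ∨ d = 4 ∨ d = 5 ∨ d = 6 ∨ d = 7 ∨ d = 8 ∨ d = 9 := by omega
  rcases hd with hd|hd|hd|hd|hd|hd|hd|hd|hd|hd <;> subst hd <;> decide

theorem pdNeed_nonneg (n : Int) :
    0 ≤ (pdNeed n).1 ∧ 0 ≤ (pdNeed n).2.1 ∧ 0 ≤ (pdNeed n).2.2 := by
  induction hn : n.toNat using Nat.strong_induction_on generalizing n with
  | _ k ih =>
    rw [pdNeed.eq_def]
    by_cases h : 0 < n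
    · simp only [dif_pos h]
      have hd0 : 0 ≤ PySem.Int.mod n 10 := PySem.Int.mod_nonneg _ (by norm_num)
      have hd1 : PySem.Int.mod n 10 < 10 := PySem.Int.mod_lt _ (by norm_num)
      have ihr := ih ((PySem.Int.floordiv n 10).toNat)
        (by subst hn; exact pd_fdiv10_lt n h) (PySem.Int.floordiv n 10) rfl
      have ha := pdAdd_nonneg _ hd0 hd1
      obtain ⟨a1, a2, a3⟩ := ha
      obtain ⟨r1, r2, r3⟩ := ihr
      exact ⟨by omega, by omega, by omega⟩
    · simp [h]

-- B's scan computes: none iff a digit 0/5 occurs, else the accumulators plus the totals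
theorem pdScanB_char (n : Int) : ∀ c2 c3 c7 : Int,
    pdScanB n c2 c3 c7 =
      if pdOk n then some (c2 + (pdNeed n).1, c3 + (pdNeed n).2.1, c7 + (pdNeed n).2.2)
      else none := by
  induction hn : n.toNat using Nat.strong_induction_on generalizing n with
  | _ k ih =>
    intro c2 c3 c7
    rw [pdScanB.eq_def, pdOk.eq_def, pdNeed.eq_def]
    by_cases h : 0 < n
    · simp only [dif_pos h]
      by_cases hz : PySem.Int.mod n 10 = 0 ∨ PySem.Int.mod n 10 = 5
      · rw [if_pos hz, if_pos hz]
        simp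
      · rw [if_neg hz, if_neg hz]
        rw [ih ((PySem.Int.floordiv n 10).toNat)
          (by subst hn; exact pd_fdiv10_lt n h) (PySem.Int.floordiv n 10) rfl]
        by_cases hok : pdOk (PySem.Int.floordiv n 10) = true
        · rw [if_pos hok, if_pos hok]
          simp only [Option.some.injEq, Prod.mk.injEq]
          refine ⟨by ring, by ring, by ring⟩
        · rw [if_neg hok, if_neg hok]
    · simp only [dif_neg h]
      simp

-- A's sequential check-and-decrement succeeds iff no digit is 0/5 and each prime's TOTAL
-- need fits the initial budget (the key fact equating the two algorithms)
theorem pdLoopA_char (n : Int) : ∀ (pf : PySem.Dict Int Int) (dd : PySem.Dict Int Bool),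
    pdLoopA n pf dd =
      (pdOk n &&
       ((pdNeed n).1 == 0 || decide ((pdNeed n).1 ≤ pf.getD 2 0)) &&
       ((pdNeed n).2.1 == 0 || decide ((pdNeed n).2.1 ≤ pf.getD 3 0)) &&
       ((pdNeed n).2.2 == 0 || decide ((pdNeed n).2.2 ≤ pf.getD 7 0))) := by
  induction hn : n.toNat using Nat.strong_induction_on generalizing n with
  | _ k ih =>
    intro pf dd
    rw [pdLoopA.eq_def, pdOk.eq_def, pdNeed.eq_def]
    by_cases h : 0 < n
    · simp only [dif_pos h]
      have hd0 : 0 ≤ PySem.Int.mod n 10 := PySem.Int.mod_nonneg _ (by norm_num)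
      have hd1 : PySem.Int.mod n 10 < 10 := PySem.Int.mod_lt _ (by norm_num)
      obtain ⟨m1, m2, m3⟩ := pdNeed_nonneg (PySem.Int.floordiv n 10)
      have IH := ih ((PySem.Int.floordiv n 10).toNat)
        (by subst hn; exact pd_fdiv10_lt n h) (PySem.Int.floordiv n 10) rfl
      have hfd : PySem.Int.floordiv n 10 = n / 10 :=
        PySem.Int.floordiv_eq_ediv_of_pos (by norm_num)
      rw [hfd] at IH m1 m2 m3
      have hd : PySem.Int.mod n 10 = 0 ∨ PySem.Int.mod n 10 = 1 ∨ PySem.Int.mod n 10 = 2 ∨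
        PySem.Int.mod n 10 = 3 ∨ PySem.Int.mod n 10 = 4 ∨ PySem.Int.mod n 10 = 5 ∨
        PySem.Int.mod n 10 = 6 ∨ PySem.Int.mod n 10 = 7 ∨ PySem.Int.mod n 10 = 8 ∨
        PySem.Int.mod n 10 = 9 := by omega
      rcases hd with hd|hd|hd|hd|hd|hd|hd|hd|hd|hd <;> rw [hd] <;>
        simp only [show pdAdd 0 = ((0:Int),(0:Int),(0:Int)) from by decide,
          show pdAdd 1 = ((0:Int),(0:Int),(0:Int)) from by decide,
          show pdAdd 2 = ((1:Int),(0:Int),(0:Int)) from by decide,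
          show pdAdd 3 = ((0:Int),(1:Int),(0:Int)) from by decide,
          show pdAdd 4 = ((2:Int),(0:Int),(0:Int)) from by decide,
          show pdAdd 5 = ((0:Int),(0:Int),(0:Int)) from by decide,
          show pdAdd 6 = ((1:Int),(1:Int),(0:Int)) from by decide,
          show pdAdd 7 = ((0:Int),(0:Int),(1:Int)) from by decide,
          show pdAdd 8 = ((3:Int),(0:Int),(0:Int)) from by decide,
          show pdAdd 9 = ((0:Int),(2:Int),(0:Int)) from by decide] <;>
        norm_num <;>
        rw [IH] <;>
        simp only [PySem.Dict.getD_insert] <;>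
        norm_num <;>
        cases hok : pdOk (n / 10) <;>
        rw [Bool.eq_iff_iff] <;>
        simp only [hok, Bool.and_eq_true, Bool.or_eq_true, beq_iff_eq, decide_eq_true_eq,
          Bool.false_eq_true, false_and, true_and, and_false, and_true, false_iff, iff_false,
          true_iff, iff_true, not_or, not_and, not_le] <;>
        omega
    · simp [h]

-- ===== VERDICT (by name: the statement is the Claim_ definition above) =====
theorem process_digits_spec : Claim_equal_process_digits := by
  intro num pf_dict dig_dict _ _
  unfold Spec_process_digits process_digits process_digits_alt
  rw [pdLoopA_char, pdScanB_char]
  by_cases h : pdOk num = true <;> simp [h]
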